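-- pv_equiv track=rewrite | github.com/jesikaavonia/random | longestword_sentence_length.py | longestword_sentence_length
-- ===== SOURCE A (Python) =====
-- def longestword_sentence_length(text):
--     list = []
--     text2=text.split(".")
--
--     for i in text2:
--         list.append(len(i))
--
--     longest = max(list)
--
--     return ("Longest word is: ", longest)
--     return ("And its length is: ", len(longest))
-- ===== SOURCE B (Python) =====
-- def longestword_sentence_length(text):
--     cur = 0
--     longest = 0
--     for ch in text:
--         if ch == ".":
--             longest = max(longest, cur)
--             cur = 0
--         else:
--             cur += 1
--     return ("Longest word is: ", max(longest, cur))
-- ===== Notes on version B (the rewrite author's own statement) =====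
-- stated objective: simpler
-- what changed: B replaces splitting on periods, building a list of segment lengths and taking its max by a single character scan that keeps a current run length and a running maximum, never materialising the segment list.
import Mathlib
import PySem

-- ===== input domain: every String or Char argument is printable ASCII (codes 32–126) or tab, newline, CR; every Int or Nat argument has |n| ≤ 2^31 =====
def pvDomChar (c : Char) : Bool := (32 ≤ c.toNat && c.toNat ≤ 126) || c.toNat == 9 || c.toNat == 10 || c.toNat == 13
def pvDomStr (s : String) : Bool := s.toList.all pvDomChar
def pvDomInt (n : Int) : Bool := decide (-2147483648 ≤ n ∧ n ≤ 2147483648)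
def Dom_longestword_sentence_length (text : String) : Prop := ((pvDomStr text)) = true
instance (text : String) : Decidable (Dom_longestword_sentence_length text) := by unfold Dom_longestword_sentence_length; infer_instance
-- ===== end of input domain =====

-- B replaces split-then-max-of-lengths by a single character scan keeping a current run
-- length and a running maximum (objective: simpler, one pass without building lists).

-- ===== PORT A =====
def longestword_sentence_length (text : String) : String × Int :=
  -- list = []; text2 = text.split(".")  (sep "." is nonempty, so split? is always `some`)
  let text2 : List String := (PySem.Str.split? text ".").getD []
  -- for i in text2: list.append(len(i))
  let list : List Int := text2.foldl (fun acc i => acc ++ [PySem.Str.len i]) []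
  -- longest = max(list)  (list has ≥ 1 element: split always yields at least one piece)
  let longest : Int := match PySem.List.max? list (fun y => y) with
    | some m => m
    | none => 0
  ("Longest word is: ", longest)

-- ===== PORT B =====
def longestword_sentence_length_alt (text : String) : String × Int :=
  -- cur = 0; longest = 0; for ch in text: if ch == '.': longest = max(longest, cur); cur = 0 else cur += 1
  let p : Int × Int :=
    text.toList.foldl
      (fun (p : Int × Int) ch => if ch = '.' then (0, max p.2 p.1) else (p.1 + 1, p.2)) (0, 0)
  ("Longest word is: ", max p.2 p.1)

-- ===== PRECONDITION & SPEC =====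
def Spec_longestword_sentence_length (text : String) (out : String × Int) : Prop := out = longestword_sentence_length_alt text
instance (text : String) (out : String × Int) : Decidable (Spec_longestword_sentence_length text out) := by unfold Spec_longestword_sentence_length; infer_instance

-- ===== CLAIM (what is proved, stated in full; the proofs are below) =====
def Claim_equal_longestword_sentence_length : Prop := ∀ (text : String), Dom_longestword_sentence_length text → Spec_longestword_sentence_length text (longestword_sentence_length text)

-- ===== LEMMAS AND PROOFS =====

-- A simple structural description of splitting on '.' (cur = reversed chars of the piece in progress).
def mySplitAux : List Char → List Char → List (List Char)
  | [], cur => [cur.reverse]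
  | c :: t, cur => if c = '.' then cur.reverse :: mySplitAux t [] else mySplitAux t (c :: cur)

theorem go_eq (fuel : Nat) : ∀ (l cur : List Char) (acc : List (List Char)), l.length < fuel →
    PySem.Chars.splitOn.go ['.'] fuel l cur acc = acc.reverse ++ mySplitAux l cur := by
  induction fuel with
  | zero => intro l cur acc h; omega
  | succ f ih =>
    intro l cur acc h
    cases l with
    | nil => simp [PySem.Chars.splitOn.go, mySplitAux]
    | cons c rest =>
      rw [PySem.Chars.splitOn.go]
      by_cases hc : c = '.'
      · subst hc
        simp only [List.isPrefixOf, BEq.rfl, Bool.and_self, if_pos]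
        have hd : List.drop ['.'].length ('.' :: rest) = rest := by simp
        rw [hd, ih rest [] (cur.reverse :: acc) (by simp at h ⊢; omega)]
        simp [mySplitAux]
      · have hp : (['.'].isPrefixOf (c :: rest)) = false := by
          simp [List.isPrefixOf]; exact fun h' => hc h'.symm
        rw [if_neg (by simp [hp])]
        rw [ih rest (c :: cur) acc (by simp at h ⊢; omega)]
        simp [mySplitAux, hc]

theorem splitOn_eq_mySplitAux (l : List Char) :
    PySem.Chars.splitOn l ['.'] = mySplitAux l [] := by
  unfold PySem.Chars.splitOn
  rw [go_eq (l.length + 1) l [] [] (by omega)]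
  rfl

theorem mySplitAux_ne_nil : ∀ (l cur : List Char), mySplitAux l cur ≠ [] := by
  intro l
  induction l with
  | nil => intro cur; simp [mySplitAux]
  | cons c t ih =>
    intro cur
    by_cases hc : c = '.' <;> simp [mySplitAux, hc, ih]

-- The one-pass scan computes the running max of segment lengths.
theorem scan_eq : ∀ (l : List Char) (cur : List Char) (lg : Int),
    (let q := l.foldl
        (fun (p : Int × Int) ch => if ch = '.' then (0, max p.2 p.1) else (p.1 + 1, p.2))
        ((cur.length : Int), lg);
      max q.2 q.1)
    = ((mySplitAux l cur).map (fun s => (s.length : Int))).foldl max lg := by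
  intro l
  induction l with
  | nil => intro cur lg; simp [mySplitAux]
  | cons c t ih =>
    intro cur lg
    by_cases hc : c = '.'
    · subst hc
      have h := ih [] (max lg (cur.length : Int))
      simp only [List.length_nil, Nat.cast_zero] at h
      simp only [List.foldl_cons, mySplitAux]
      simpa using h
    · have h := ih (c :: cur) lg
      simp only [List.length_cons, Nat.cast_add, Nat.cast_one] at h
      simp only [List.foldl_cons, mySplitAux, hc, if_false]
      simpa using h

theorem ports_agree (text : String) :
    longestword_sentence_length text = longestword_sentence_length_alt text := by
  unfold longestword_sentence_length longestword_sentence_length_alt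
  -- identify A's split result
  have hsplit : (PySem.Str.split? text ".").getD [] =
      (PySem.Chars.splitOn text.toList ['.']).map String.ofList := by
    have h := PySem.Str.split?_map text "."
    have hs : PySem.Chars.split? text.toList ".".toList =
        some (PySem.Chars.splitOn text.toList ".".toList) := by
      simp [PySem.Chars.split?]
    rw [hs] at h
    cases he : PySem.Str.split? text "." with
    | none => rw [he] at h; simp at h
    | some xs =>
      rw [he] at h
      simp only [Option.map_some, Option.some.injEq] at h
      have : xs = (PySem.Chars.splitOn text.toList ".".toList).map String.ofList := by
        rw [← h]; simp [List.map_map, Function.comp_def, String.ofList_toList]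
      simpa using this
  simp only [hsplit, splitOn_eq_mySplitAux,
    PySem.List.foldl_append_singleton_eq_map, List.nil_append, List.map_map]
  have hlen : ((fun i => PySem.Str.len i) ∘ String.ofList) = fun s : List Char => (s.length : Int) := by
    funext s; simp [PySem.Str.len_eq]
  rw [hlen]
  -- name the pieces
  obtain ⟨s, ss, hss⟩ : ∃ s ss, mySplitAux text.toList [] = s :: ss := by
    cases h : mySplitAux text.toList [] with
    | nil => exact absurd h (mySplitAux_ne_nil _ _)
    | cons a b => exact ⟨a, b, rfl⟩
  have hscan := scan_eq text.toList [] 0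
  simp only [List.length_nil, Nat.cast_zero] at hscan
  rw [hscan, hss]
  simp only [List.map_cons, PySem.List.max?_id_cons]
  simp

-- ===== VERDICT (by name: the statement is the Claim_ definition above) =====
theorem longestword_sentence_length_spec : Claim_equal_longestword_sentence_length := by
  intro text _
  exact ports_agree text
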